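-- pv_equiv track=rewrite | github.com/vdubey0/nba-agent | backend/scripts/chat_benchmark.py | required_derived_metrics_present
-- ===== SOURCE A (Python) =====
-- from typing import Any
--
-- def required_derived_metrics_present(case: dict[str, Any], query_specs: list[dict[str, Any]]) -> bool:
--     required = set(case.get("required_derived_metrics") or [])
--     if not required:
--         return True
--     present: set[str] = set()
--     for spec in query_specs:
--         derived_metrics = spec.get("derived_metrics") or []
--         if isinstance(derived_metrics, list):
--             present.update(derived_metrics)
--     return required.issubset(present)
-- ===== SOURCE B (Python) =====
-- def _found_in_specs(m, specs):
--     # Recursively scan specs until one whose derived_metrics list contains m.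
--     if not specs:
--         return False
--     dm = specs[0].get("derived_metrics") or []
--     if isinstance(dm, list) and m in dm:
--         return True
--     return _found_in_specs(m, specs[1:])
--
-- def _all_found(metrics, specs):
--     # Recursively require every metric to be found in some spec.
--     if not metrics:
--         return True
--     return _found_in_specs(metrics[0], specs) and _all_found(metrics[1:], specs)
--
-- def required_derived_metrics_present(case, query_specs):
--     return _all_found(case.get("required_derived_metrics") or [], query_specs)
-- ===== Notes on version B (the rewrite author's own statement) =====
-- stated objective: alternative
-- what changed: Replaces A's build-a-union-set-then-issubset pass with a pair of recursive helpers that, for each required metric in turn, scan the specs until one's derived_metrics list contains it (short-circuiting; the empty-required case is the base case instead of an explicit early return).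
import Mathlib
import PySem

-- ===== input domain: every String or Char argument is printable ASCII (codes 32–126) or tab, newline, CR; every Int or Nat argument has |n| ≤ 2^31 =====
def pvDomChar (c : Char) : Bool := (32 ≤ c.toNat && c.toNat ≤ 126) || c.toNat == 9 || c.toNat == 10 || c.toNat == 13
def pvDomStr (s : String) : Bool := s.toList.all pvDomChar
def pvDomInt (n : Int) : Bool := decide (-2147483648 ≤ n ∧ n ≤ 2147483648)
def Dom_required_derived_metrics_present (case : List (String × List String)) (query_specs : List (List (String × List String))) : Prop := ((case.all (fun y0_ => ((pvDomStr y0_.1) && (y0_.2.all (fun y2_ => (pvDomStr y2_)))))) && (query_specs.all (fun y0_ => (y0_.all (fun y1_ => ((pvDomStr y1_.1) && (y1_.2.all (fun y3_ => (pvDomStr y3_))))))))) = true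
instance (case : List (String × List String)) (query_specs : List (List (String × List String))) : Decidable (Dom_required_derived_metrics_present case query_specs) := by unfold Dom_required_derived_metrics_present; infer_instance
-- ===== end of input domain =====

-- B replaces A's build-union-set-then-issubset pass with two short-circuiting recursive scans
-- (per required metric, find a spec containing it): a different decomposition of the same check.

-- ===== PORT A =====
-- A builds the set of required metrics, returns True if empty, otherwise unions every
-- spec's derived_metrics into 'present' and checks required ⊆ present.
-- (values are typed List String, so Python's 'isinstance(derived_metrics, list)' is always true and
-- 'spec.get(k) or []' is getD with default [] — an empty list and a missing key both yield [].)
def required_derived_metrics_present (case : List (String × List String)) (query_specs : List (List (String × List String))) : Bool :=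
  let required : PySem.Set String :=
    PySem.Set.ofList ((PySem.Dict.mk case).getD "required_derived_metrics" [])
  if required.isEmpty then true
  else
    let present : PySem.Set String :=
      query_specs.foldl
        (fun acc spec => PySem.Set.update acc ((PySem.Dict.mk spec).getD "derived_metrics" []))
        PySem.Set.empty
    PySem.Set.issubset required present

-- ===== PORT B =====
-- B helper: recursively scan the specs until one whose derived_metrics list contains m.
def pvFoundInSpecs (m : String) (specs : List (List (String × List String))) : Bool :=
  match specs with
  | [] => false
  | spec :: rest =>
    let dm := (PySem.Dict.mk spec).getD "derived_metrics" []
    if dm.contains m then true else pvFoundInSpecs m rest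

-- B helper: recursively require every metric to be found in some spec.
def pvAllFound (metrics : List String) (specs : List (List (String × List String))) : Bool :=
  match metrics with
  | [] => true
  | m :: rest => pvFoundInSpecs m specs && pvAllFound rest specs

def required_derived_metrics_present_alt (case : List (String × List String)) (query_specs : List (List (String × List String))) : Bool :=
  pvAllFound ((PySem.Dict.mk case).getD "required_derived_metrics" []) query_specs

-- ===== PRECONDITION & SPEC =====
def Spec_required_derived_metrics_present (case : List (String × List String)) (query_specs : List (List (String × List String))) (out : Bool) : Prop := out = required_derived_metrics_present_alt case query_specs
instance (case : List (String × List String)) (query_specs : List (List (String × List String))) (out : Bool) : Decidable (Spec_required_derived_metrics_present case query_specs out) := by unfold Spec_required_derived_metrics_present; infer_instance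

-- ===== CLAIM (what is proved, stated in full; the proofs are below) =====
def Claim_equal_required_derived_metrics_present : Prop := ∀ (case : List (String × List String)) (query_specs : List (List (String × List String))), Dom_required_derived_metrics_present case query_specs → Spec_required_derived_metrics_present case query_specs (required_derived_metrics_present case query_specs)

-- ===== LEMMAS AND PROOFS =====

-- Membership in the accumulated union of all specs' derived_metrics lists (A's 'present' set).
theorem mem_foldl_update {α : Type} [BEq α] [LawfulBEq α] {β : Type}
    (f : β → List α) (l : List β) (acc : PySem.Set α) (y : α) :
    (y ∈ l.foldl (fun acc spec => PySem.Set.update acc (f spec)) acc) ↔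
      (y ∈ acc ∨ ∃ spec ∈ l, y ∈ f spec) := by
  induction l generalizing acc with
  | nil => simp
  | cons b l ih =>
    simp only [List.foldl_cons, ih, PySem.Set.mem_update, List.mem_cons]
    constructor
    · rintro (⟨h | h⟩ | ⟨s, hs, hy⟩)
      · exact Or.inl h
      · exact Or.inr ⟨b, Or.inl rfl, h⟩
      · exact Or.inr ⟨s, Or.inr hs, hy⟩
    · rintro (h | ⟨s, (rfl | hs), hy⟩)
      · exact Or.inl (Or.inl h)
      · exact Or.inl (Or.inr hy)
      · exact Or.inr ⟨s, hs, hy⟩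

-- B's inner scan finds m iff some spec's derived_metrics list contains m.
theorem pvFoundInSpecs_iff (m : String) (specs : List (List (String × List String))) :
    pvFoundInSpecs m specs = true ↔
      ∃ spec ∈ specs, m ∈ (PySem.Dict.mk spec).getD "derived_metrics" [] := by
  induction specs with
  | nil => simp [pvFoundInSpecs]
  | cons s rest ih =>
    simp only [pvFoundInSpecs]
    by_cases h : ((PySem.Dict.mk s).getD "derived_metrics" []).contains m
    · simp only [h, if_true, true_iff]
      exact ⟨s, List.mem_cons_self .., by simpa using h⟩
    · simp only [h, Bool.false_eq_true, if_false, ih, List.mem_cons]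
      constructor
      · rintro ⟨sp, hsp, hm⟩; exact ⟨sp, Or.inr hsp, hm⟩
      · rintro ⟨sp, (rfl | hsp), hm⟩
        · exact absurd (by simpa using hm) (by simpa using h)
        · exact ⟨sp, hsp, hm⟩

-- B's outer scan succeeds iff every metric is found.
theorem pvAllFound_iff (metrics : List String) (specs : List (List (String × List String))) :
    pvAllFound metrics specs = true ↔ ∀ m ∈ metrics, pvFoundInSpecs m specs = true := by
  induction metrics with
  | nil => simp [pvAllFound]
  | cons m rest ih => simp [pvAllFound, ih]

-- ===== VERDICT (by name: the statement is the Claim_ definition above) =====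
theorem required_derived_metrics_present_spec : Claim_equal_required_derived_metrics_present := by
  intro case query_specs _
  unfold Spec_required_derived_metrics_present required_derived_metrics_present
    required_derived_metrics_present_alt
  set req := (PySem.Dict.mk case).getD "required_derived_metrics" [] with hreq
  by_cases h : (PySem.Set.ofList req).isEmpty
  · simp only [h, if_true]
    have : req = [] := by
      cases hr : req with
      | nil => rfl
      | cons a l =>
        exfalso
        have ha : a ∈ PySem.Set.ofList req := by
          rw [PySem.Set.mem_ofList, hr]; exact List.mem_cons_self ..
        rw [List.isEmpty_iff] at h
        simp [h] at ha
    simp [this, pvAllFound]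
  · rw [Bool.not_eq_true] at h
    simp only [h, Bool.false_eq_true, if_false]
    rw [Bool.eq_iff_iff, PySem.Set.issubset_iff, pvAllFound_iff]
    simp only [PySem.Set.mem_ofList, mem_foldl_update, PySem.Set.empty, List.not_mem_nil,
      false_or, pvFoundInSpecs_iff]
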